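-- pv_equiv track=rewrite | github.com/Pataclop/beautiful-tides | fonctions.py | remove_lines_until_marker
-- ===== SOURCE A (Python) =====
-- def remove_lines_until_marker(text, marker):
--     lines = text.split("\n")
--     output_lines = []
--     found_marker = False
--     for line in lines:
--         if found_marker:
--             output_lines.append(line)
--         if marker in line:
--             found_marker = True
--     result = "\n".join(output_lines)
--     return result
-- ===== SOURCE B (Python) =====
-- def remove_lines_until_marker(text, marker):
--     lines = text.split("\n")
--     for i, line in enumerate(lines):
--         if marker in line:
--             return "\n".join(lines[i + 1:])
--     return ""
-- ===== Notes on version B (the rewrite author's own statement) =====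
-- stated objective: simpler
-- what changed: Replaces the running boolean flag and output-accumulator loop with find-the-first-matching-line-then-slice: return at the first line containing the marker with the join of the remaining lines, else return "".
import Mathlib
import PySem

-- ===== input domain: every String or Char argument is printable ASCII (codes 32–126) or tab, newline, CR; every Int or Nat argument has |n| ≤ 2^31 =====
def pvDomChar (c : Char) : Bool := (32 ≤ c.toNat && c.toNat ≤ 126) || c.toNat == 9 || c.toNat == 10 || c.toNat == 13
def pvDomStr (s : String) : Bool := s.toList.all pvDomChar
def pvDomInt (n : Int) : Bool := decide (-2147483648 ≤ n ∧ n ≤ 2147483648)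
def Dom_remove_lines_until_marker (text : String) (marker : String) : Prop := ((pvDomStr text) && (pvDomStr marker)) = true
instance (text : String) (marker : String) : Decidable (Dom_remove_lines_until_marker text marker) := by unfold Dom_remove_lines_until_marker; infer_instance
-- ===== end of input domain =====

-- B replaces A's running boolean flag and output-accumulator with find-first-matching-line-then-slice (simpler decomposition; same linear cost).

-- ===== PORT A =====
-- the for-loop of A: state is (found_marker, output_lines); per line, append if found, then test the marker
def pvLoopA (marker : String) : List String → Bool → List String → List String
  | [], _, out => out
  | line :: rest, found, out =>
      pvLoopA marker rest (found || PySem.Str.isIn marker line)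
        (if found then out ++ [line] else out)

def remove_lines_until_marker (text : String) (marker : String) : String :=
  let lines := (PySem.Str.split? text "\n").getD []   -- sep "\n" ≠ "", so split? is always some here
  PySem.Str.join "\n" (pvLoopA marker lines false [])

-- ===== PORT B =====
-- the for-loop of B: return the join of the remaining lines at the first line containing the marker, else ""
def pvScanB (marker : String) : List String → String
  | [] => ""
  | line :: rest =>
      if PySem.Str.isIn marker line then PySem.Str.join "\n" rest
      else pvScanB marker rest

def remove_lines_until_marker_alt (text : String) (marker : String) : String :=
  let lines := (PySem.Str.split? text "\n").getD []
  pvScanB marker lines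

-- ===== PRECONDITION & SPEC =====
def Spec_remove_lines_until_marker (text : String) (marker : String) (out : String) : Prop := out = remove_lines_until_marker_alt text marker
instance (text : String) (marker : String) (out : String) : Decidable (Spec_remove_lines_until_marker text marker out) := by unfold Spec_remove_lines_until_marker; infer_instance

-- ===== CLAIM (what is proved, stated in full; the proofs are below) =====
def Claim_equal_remove_lines_until_marker : Prop := ∀ (text : String) (marker : String), Dom_remove_lines_until_marker text marker → Spec_remove_lines_until_marker text marker (remove_lines_until_marker text marker)

-- ===== LEMMAS AND PROOFS =====

-- the lines A's loop collects: everything after the first line containing the marker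
def pvTail (marker : String) : List String → List String
  | [] => []
  | line :: rest => if PySem.Str.isIn marker line then rest else pvTail marker rest

theorem pvLoopA_true (marker : String) (ls : List String) (out : List String) :
    pvLoopA marker ls true out = out ++ ls := by
  induction ls generalizing out with
  | nil => simp [pvLoopA]
  | cons l rest ih => simp [pvLoopA, ih]

theorem pvLoopA_false (marker : String) (ls : List String) (out : List String) :
    pvLoopA marker ls false out = out ++ pvTail marker ls := by
  induction ls generalizing out with
  | nil => simp [pvLoopA, pvTail]
  | cons l rest ih =>
      by_cases h : PySem.Chars.isIn marker.toList l.toList = true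
      · simp [pvLoopA, pvTail, PySem.Str.isIn, h, pvLoopA_true]
      · simp only [Bool.not_eq_true] at h
        simp [pvLoopA, pvTail, PySem.Str.isIn, h, ih]

theorem pvScanB_eq_join_tail (marker : String) (ls : List String) :
    pvScanB marker ls = PySem.Str.join "\n" (pvTail marker ls) := by
  induction ls with
  | nil => rfl
  | cons l rest ih =>
      by_cases h : PySem.Chars.isIn marker.toList l.toList = true
      · simp [pvScanB, pvTail, PySem.Str.isIn, h]
      · simp only [Bool.not_eq_true] at h
        simp [pvScanB, pvTail, PySem.Str.isIn, h, ih]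

-- ===== VERDICT (by name: the statement is the Claim_ definition above) =====
theorem remove_lines_until_marker_spec : Claim_equal_remove_lines_until_marker := by
  intro text marker _
  unfold Spec_remove_lines_until_marker remove_lines_until_marker remove_lines_until_marker_alt
  simp [pvLoopA_false, pvScanB_eq_join_tail]
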